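-- pv_equiv track=rewrite | github.com/Yusuke-8/minimages | NumerOn/NumerOn2.py | Match_Bite
-- ===== SOURCE A (Python) =====
-- def Match_Bite(computer_list,player_list):
-- # 数字があることを数える関数
--     count = 0
--     for i_index in range(0,len(player_list)):
--         for j_index in range(0,len(player_list)):
--             if player_list[i_index] == computer_list[j_index]:
--                 count += 1
--     for i_index in range(0,len(player_list)):
--         if player_list[i_index] == computer_list[i_index]:
--             count -= 1
--     return count
-- ===== SOURCE B (Python) =====
-- def Match_Bite(computer_list, player_list):
--     n = len(player_list)
--     computer_count = {}
--     for i in range(n):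
--         v = computer_list[i]  # IndexError here if computer_list is shorter, as in A
--         computer_count[v] = computer_count.get(v, 0) + 1
--     player_count = {}
--     for v in player_list:
--         player_count[v] = player_count.get(v, 0) + 1
--     total = 0
--     for v in player_count:
--         total += player_count[v] * computer_count.get(v, 0)
--     exact = 0
--     for i in range(n):
--         if player_list[i] == computer_list[i]:
--             exact += 1
--     return total - exact
-- ===== Notes on version B (the rewrite author's own statement) =====
-- stated objective: faster
-- what changed: Replaces A's quadratic nested position-by-position scan with frequency dictionaries built in one pass each, multiplying counts over distinct values instead of comparing every index pair.
import Mathlib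
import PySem

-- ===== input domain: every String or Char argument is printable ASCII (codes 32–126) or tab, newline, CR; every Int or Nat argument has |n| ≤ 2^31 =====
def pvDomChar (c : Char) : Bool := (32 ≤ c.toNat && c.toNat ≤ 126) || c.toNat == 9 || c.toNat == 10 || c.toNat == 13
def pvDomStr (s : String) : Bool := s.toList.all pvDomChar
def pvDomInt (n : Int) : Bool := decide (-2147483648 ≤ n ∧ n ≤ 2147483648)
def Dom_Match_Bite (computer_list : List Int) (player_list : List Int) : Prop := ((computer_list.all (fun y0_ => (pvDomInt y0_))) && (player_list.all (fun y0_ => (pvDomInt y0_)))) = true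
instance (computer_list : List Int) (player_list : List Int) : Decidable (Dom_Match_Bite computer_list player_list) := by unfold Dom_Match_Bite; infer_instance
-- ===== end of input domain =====

-- B replaces A's quadratic nested index scan with one-pass frequency dictionaries,
-- multiplying counts over distinct values.

-- ===== PORT A =====
def Match_Bite (computer_list : List Int) (player_list : List Int) : Int :=
  let count : Int := 0
  let count := (PySem.List.pyRange 0 (player_list.length : Int) 1).foldl
    (fun count i_index =>
      (PySem.List.pyRange 0 (player_list.length : Int) 1).foldl
        (fun count j_index =>
          if PySem.List.pyGetD player_list i_index 0 == PySem.List.pyGetD computer_list j_index 0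
          then count + 1 else count) count) count
  let count := (PySem.List.pyRange 0 (player_list.length : Int) 1).foldl
    (fun count i_index =>
      if PySem.List.pyGetD player_list i_index 0 == PySem.List.pyGetD computer_list i_index 0
      then count - 1 else count) count
  count

-- ===== PORT B =====
def Match_Bite_alt (computer_list : List Int) (player_list : List Int) : Int :=
  let n := (player_list.length : Int)
  let computer_count := (PySem.List.pyRange 0 n 1).foldl
    (fun d i => let v := PySem.List.pyGetD computer_list i 0
                d.insert v (d.getD v 0 + 1)) PySem.Dict.empty
  let player_count := player_list.foldl
    (fun d v => d.insert v (d.getD v 0 + 1)) PySem.Dict.empty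
  let total := player_count.items.foldl
    (fun total kv => total + kv.2 * computer_count.getD kv.1 0) 0
  let exact := (PySem.List.pyRange 0 n 1).foldl
    (fun exact i =>
      if PySem.List.pyGetD player_list i 0 == PySem.List.pyGetD computer_list i 0
      then exact + 1 else exact) 0
  total - exact

-- ===== PRECONDITION & SPEC =====
-- A indexes computer_list at every position of player_list, so it raises IndexError
-- exactly when computer_list is shorter than a nonempty player_list; Pre_ excludes
-- exactly those raising inputs (B raises there too).
def Pre_Match_Bite (computer_list : List Int) (player_list : List Int) : Prop :=
  player_list.length ≤ computer_list.length
instance (computer_list : List Int) (player_list : List Int) : Decidable (Pre_Match_Bite computer_list player_list) := by unfold Pre_Match_Bite; infer_instance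

def pvWitness_Match_Bite : List Int × List Int := ([3, 1, 4], [1, 2, 3])

def Spec_Match_Bite (computer_list : List Int) (player_list : List Int) (out : Int) : Prop := out = Match_Bite_alt computer_list player_list
instance (computer_list : List Int) (player_list : List Int) (out : Int) : Decidable (Spec_Match_Bite computer_list player_list out) := by unfold Spec_Match_Bite; infer_instance

-- ===== CLAIM (what is proved, stated in full; the proofs are below) =====
def Claim_equal_Match_Bite : Prop := ∀ (computer_list : List Int) (player_list : List Int), Dom_Match_Bite computer_list player_list → Pre_Match_Bite computer_list player_list → Spec_Match_Bite computer_list player_list (Match_Bite computer_list player_list)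

-- ===== LEMMAS AND PROOFS =====

theorem foldl_if_sub_one {α : Type} (p : α → Bool) (l : List α) (a : Int) :
    List.foldl (fun acc x => if p x then acc - 1 else acc) a l = a - (l.countP p : Int) := by
  induction l generalizing a with
  | nil => simp
  | cons x t ih =>
    simp only [List.foldl_cons, List.countP_cons, ih]
    by_cases h : p x
    · simp [h]; ring
    · simp [h]

theorem sum_map_ite_single {d : List Int} (f : Int → Int) (x : Int)
    (hn : d.Nodup) (hx : x ∈ d) :
    (d.map (fun k => if k = x then f k else 0)).sum = f x := by
  induction d with
  | nil => simp at hx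
  | cons y t ih =>
    simp only [List.map_cons, List.sum_cons]
    rcases List.mem_cons.mp hx with h | h
    · have hz : ∀ k ∈ t, (if k = x then f k else 0) = 0 := by
        intro k hk
        have : k ≠ x := fun e => (List.nodup_cons.mp hn).1 (h ▸ e ▸ hk)
        simp [this]
      have : (List.map (fun k => if k = x then f k else 0) t).sum = 0 :=
        List.sum_eq_zero fun z hz' => by
          rcases List.mem_map.mp hz' with ⟨k, hk, rfl⟩; exact hz k hk
      simp [← h, this]
    · have hyx : y ≠ x := fun e => (List.nodup_cons.mp hn).1 (e ▸ h)
      simp [hyx, ih (List.nodup_cons.mp hn).2 h]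

theorem sum_count_mul {d : List Int} (p : List Int) (f : Int → Int)
    (hn : d.Nodup) (hmem : ∀ y ∈ p, y ∈ d) :
    (d.map (fun k => (p.count k : Int) * f k)).sum = (p.map f).sum := by
  induction p with
  | nil => simp
  | cons x t ih =>
    have hx : x ∈ d := hmem x (List.mem_cons_self)
    have ht : ∀ y ∈ t, y ∈ d := fun y hy => hmem y (List.mem_cons_of_mem _ hy)
    have step : ∀ k : Int, ((x :: t).count k : Int) * f k
        = (t.count k : Int) * f k + (if k = x then f k else 0) := by
      intro k
      rcases eq_or_ne k x with h | h
      · subst h; rw [List.count_cons_self, if_pos rfl]; push_cast; ring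
      · rw [List.count_cons_of_ne (fun e => h e.symm), if_neg h]; ring
    calc (d.map (fun k => ((x :: t).count k : Int) * f k)).sum
        = (d.map (fun k => (t.count k : Int) * f k + (if k = x then f k else 0))).sum := by
          simp only [step]
      _ = (d.map (fun k => (t.count k : Int) * f k)).sum
            + (d.map (fun k => if k = x then f k else 0)).sum := by
          rw [← List.sum_map_add]
      _ = (t.map f).sum + f x := by rw [ih ht, sum_map_ite_single f x hn hx]
      _ = ((x :: t).map f).sum := by simp [add_comm]

-- pyGetD into a take-prefix
theorem pyGetD_take {c : List Int} {n : Nat} {j : Int} (d : Int)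
    (h0 : 0 ≤ j) (h1 : j < (n : Int)) (hn : (n : Int) ≤ (c.length : Int)) :
    PySem.List.pyGetD (c.take n) j d = PySem.List.pyGetD c j d := by
  have hlen : (c.take n).length = n := by
    simp [List.length_take]; omega
  have h1' : j < ((c.take n).length : Int) := by rw [hlen]; exact_mod_cast h1
  have h1c : j < (c.length : Int) := lt_of_lt_of_le h1 hn
  rw [PySem.List.pyGetD_eq_getElem _ d h0 h1', PySem.List.pyGetD_eq_getElem _ d h0 h1c]
  rw [List.getElem_take]

theorem main_eq (computer_list player_list : List Int)
    (hpre : player_list.length ≤ computer_list.length) :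
    Match_Bite computer_list player_list = Match_Bite_alt computer_list player_list := by
  set p := player_list
  set c := computer_list
  set n := p.length with hn
  set c' := c.take n with hc'
  have hnc : (n : Int) ≤ (c.length : Int) := by exact_mod_cast hpre
  have hlen : ((c'.length : Nat) : Int) = (n : Int) := by
    simp [hc', List.length_take]; omega
  -- replace the c-indexed range folds by c'-folds
  have hrepl : ∀ (β : Type) (f : β → Int → β) (init : β),
      (PySem.List.pyRange 0 (n : Int) 1).foldl
        (fun acc j => f acc (PySem.List.pyGetD c j 0)) init
      = c'.foldl f init := by
    intro β f init
    have := PySem.List.foldl_congr_mem (PySem.List.pyRange 0 (n : Int) 1)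
      (fun acc j => f acc (PySem.List.pyGetD c j 0))
      (fun acc j => f acc (PySem.List.pyGetD c' j 0)) init ?_
    · rw [this, ← hlen]
      exact PySem.List.foldl_pyRange_zero_pyGetD' c' 0 f init
    · intro acc x hx
      rcases PySem.List.mem_pyRange_one.mp hx with ⟨h0, h1⟩
      show f acc (PySem.List.pyGetD c x 0) = f acc (PySem.List.pyGetD c' x 0)
      rw [hc', pyGetD_take 0 h0 h1 hnc]
  -- inner loop of A
  have hinner : ∀ (x cnt : Int),
      (PySem.List.pyRange 0 (n : Int) 1).foldl
        (fun cnt j => if x == PySem.List.pyGetD c j 0 then cnt + 1 else cnt) cnt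
      = cnt + (c'.countP (fun v => x == v) : Int) := by
    intro x cnt
    rw [hrepl Int (fun cnt v => if x == v then cnt + 1 else cnt) cnt]
    exact PySem.List.foldl_if_add_one (fun v => x == v) c' cnt
  -- A's double loop
  have hA1 : (PySem.List.pyRange 0 (n : Int) 1).foldl
      (fun cnt i =>
        (PySem.List.pyRange 0 (n : Int) 1).foldl
          (fun cnt j => if PySem.List.pyGetD p i 0 == PySem.List.pyGetD c j 0 then cnt + 1 else cnt) cnt) 0
      = (p.map (fun x => (c'.count x : Int))).sum := by
    rw [PySem.List.foldl_congr_mem _ _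
      (fun cnt i => cnt + (c'.countP (fun v => PySem.List.pyGetD p i 0 == v) : Int)) 0
      (fun acc i _ => hinner (PySem.List.pyGetD p i 0) acc)]
    rw [PySem.List.foldl_add]
    have : (PySem.List.pyRange 0 (n : Int) 1).map
        (fun i => (c'.countP (fun v => PySem.List.pyGetD p i 0 == v) : Int))
      = ((PySem.List.pyRange 0 (n : Int) 1).map (fun i => PySem.List.pyGetD p i 0)).map
          (fun x => (c'.countP (fun v => x == v) : Int)) := by
      rw [List.map_map]; rfl
    rw [this, PySem.List.map_pyGetD_pyRange_zero' p 0]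
    have hcnt : ∀ x : Int, c'.countP (fun v => x == v) = c'.count x := by
      intro x
      exact List.countP_congr (fun a _ => ⟨fun h => beq_of_eq (eq_of_beq h).symm, fun h => beq_of_eq (eq_of_beq h).symm⟩)
    simp only [hcnt, zero_add]
  -- B's computer counter
  have hcc : (PySem.List.pyRange 0 (n : Int) 1).foldl
      (fun d i => d.insert (PySem.List.pyGetD c i 0) (d.getD (PySem.List.pyGetD c i 0) 0 + 1))
      PySem.Dict.empty = PySem.Dict.counter c' := by
    rw [hrepl (PySem.Dict Int Int) (fun d v => d.insert v (d.getD v 0 + 1)) PySem.Dict.empty]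
    exact PySem.Dict.foldl_insert_getD_add_one_eq_counter c'
  -- B's total
  have htotal : ((PySem.Dict.counter p).items).foldl
      (fun t kv => t + kv.2 * (PySem.Dict.counter c').getD kv.1 0) 0
      = (p.map (fun x => (c'.count x : Int))).sum := by
    rw [PySem.List.foldl_add ((PySem.Dict.counter p).items)
      (fun kv : Int × Int => kv.2 * (PySem.Dict.counter c').getD kv.1 0) 0]
    rw [PySem.Dict.items_counter p, List.map_map]
    have : ((fun kv : Int × Int => kv.2 * (PySem.Dict.counter c').getD kv.1 0) ∘
        (fun k => (k, (List.count k p : Int))))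
      = fun k => (p.count k : Int) * (c'.count k : Int) := by
      funext k
      simp [Function.comp, PySem.Dict.getD_counter]
    rw [this, zero_add]
    exact sum_count_mul p (fun x => (c'.count x : Int))
      (by exact PySem.Set.nodup_ofList p)
      (fun y hy => (PySem.Set.mem_ofList p y).mpr hy)
  -- assemble
  simp only [Match_Bite, Match_Bite_alt]
  rw [foldl_if_sub_one, PySem.List.foldl_if_add_one]
  rw [hA1, hcc]
  rw [show player_list.foldl (fun d v => d.insert v (d.getD v 0 + 1)) PySem.Dict.empty
      = PySem.Dict.counter p from PySem.Dict.foldl_insert_getD_add_one_eq_counter p]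
  rw [htotal, zero_add]

-- ===== VERDICT (by name: the statement is the Claim_ definition above) =====
theorem Match_Bite_spec : Claim_equal_Match_Bite := by
  intro computer_list player_list _ hpre
  unfold Spec_Match_Bite
  exact main_eq computer_list player_list hpre
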